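-- pv_equiv track=rewrite | github.com/ArseniiChan/LeetCode | 3450-maximum-students-on-a-single-bench/3450-maximum-students-on-a-single-bench.py | maxStudentsOnBench
-- ===== SOURCE A (Python) =====
-- from typing import List
--
-- def maxStudentsOnBench(students: List[List[int]]) -> int:
--     benches = {}
--     result = 0
--     for pair in students:
--         sid = pair[0]
--         bid = pair[1]
--         if bid not in benches:
--             benches[bid] = set()
--         benches[bid].add(sid)
--
--     for s in benches.values():
--         result = max(result, len(s))
--     return result
-- ===== SOURCE B (Python) =====
-- from typing import List
--
-- def maxStudentsOnBench(students: List[List[int]]) -> int: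
--     order = sorted(students, key=lambda p: (p[1], p[0]))
--     best = 0
--     cur_bench = None
--     last_student = None
--     count = 0
--     for p in order:
--         s = p[0]
--         b = p[1]
--         if b != cur_bench:
--             best = max(best, count)
--             cur_bench = b
--             last_student = None
--             count = 0
--         if s != last_student:
--             count += 1
--             last_student = s
--     return max(best, count)
-- ===== Notes on version B (the rewrite author's own statement) =====
-- stated objective: alternative
-- what changed: Instead of building a dict of per-bench sets and scanning their sizes, B sorts a copy of the list by (bench, student) and makes one linear scan that skips adjacent duplicate students and maximises the per-bench run length, keeping no set or dict at all.
import Mathlib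
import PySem

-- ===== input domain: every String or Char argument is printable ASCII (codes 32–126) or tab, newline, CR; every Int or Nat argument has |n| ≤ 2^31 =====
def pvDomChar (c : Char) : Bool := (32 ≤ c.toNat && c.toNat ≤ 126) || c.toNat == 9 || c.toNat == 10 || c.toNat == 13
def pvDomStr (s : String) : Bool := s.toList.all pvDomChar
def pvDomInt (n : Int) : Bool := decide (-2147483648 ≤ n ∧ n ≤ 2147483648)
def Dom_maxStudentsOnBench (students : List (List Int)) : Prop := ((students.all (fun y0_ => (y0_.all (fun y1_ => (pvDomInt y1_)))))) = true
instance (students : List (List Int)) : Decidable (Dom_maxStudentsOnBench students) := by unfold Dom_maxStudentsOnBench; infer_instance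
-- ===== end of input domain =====

-- B replaces A's dict of per-bench sets by sort-then-scan: sort a copy by (bench, student),
-- then one linear scan that skips adjacent duplicate students and maximises per-bench run
-- lengths (objective: alternative decomposition, no per-bench set is maintained).


-- ===== PORT A =====
def maxStudentsOnBench (students : List (List Int)) : Int :=
  let benches : PySem.Dict Int (PySem.Set Int) :=
    students.foldl (fun benches pair =>
      let sid := (PySem.List.pyGet? pair 0).getD 0
      let bid := (PySem.List.pyGet? pair 1).getD 0
      let benches := if benches.contains bid then benches
                     else benches.insert bid PySem.Set.empty
      benches.modify bid PySem.Set.empty (fun s => PySem.Set.add s sid)) PySem.Dict.empty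
  benches.values.foldl (fun result s => max result (PySem.Set.len s)) 0

-- ===== PORT B =====
def maxStudentsOnBench_alt (students : List (List Int)) : Int :=
  let order := PySem.List.sorted2 students
    (fun p => (PySem.List.pyGet? p 1).getD 0) (fun p => (PySem.List.pyGet? p 0).getD 0)
  let st := order.foldl (fun st p =>
      let s := (PySem.List.pyGet? p 0).getD 0
      let b := (PySem.List.pyGet? p 1).getD 0
      let st1 := if some b ≠ st.2.1 then (max st.1 st.2.2.2, some b, (none : Option Int), (0 : Int)) else st
      if some s ≠ st1.2.2.1 then (st1.1, st1.2.1, some s, st1.2.2.2 + 1) else st1)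
    ((0 : Int), (none : Option Int), (none : Option Int), (0 : Int))
  max st.1 st.2.2.2

-- ===== PRECONDITION & SPEC =====
-- Pre_ excludes exactly the inputs where A raises IndexError: a pair with fewer than two entries.
def Pre_maxStudentsOnBench (students : List (List Int)) : Prop :=
  ∀ p ∈ students, 2 ≤ p.length
instance (students : List (List Int)) : Decidable (Pre_maxStudentsOnBench students) := by
  unfold Pre_maxStudentsOnBench; infer_instance
def pvWitness_maxStudentsOnBench : List (List Int) := [[1, 2], [3, 2], [1, 2], [5, 9]]

def Spec_maxStudentsOnBench (students : List (List Int)) (out : Int) : Prop := out = maxStudentsOnBench_alt students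
instance (students : List (List Int)) (out : Int) : Decidable (Spec_maxStudentsOnBench students out) := by unfold Spec_maxStudentsOnBench; infer_instance

-- ===== CLAIM (what is proved, stated in full; the proofs are below) =====
def Claim_equal_maxStudentsOnBench : Prop := ∀ (students : List (List Int)), Dom_maxStudentsOnBench students → Pre_maxStudentsOnBench students → Spec_maxStudentsOnBench students (maxStudentsOnBench students)

-- ===== LEMMAS AND PROOFS =====

-- proof-side view of B's scan: state (best, current bench, last student, running count)
def pvStep (st : Int × Option Int × Option Int × Int) (q : Int × Int) :
    Int × Option Int × Option Int × Int :=
  let st1 := if some q.1 ≠ st.2.1 then (max st.1 st.2.2.2, some q.1, (none : Option Int), (0 : Int)) else st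
  if some q.2 ≠ st1.2.2.1 then (st1.1, st1.2.1, some q.2, st1.2.2.2 + 1) else st1

def pvFinal (st : Int × Option Int × Option Int × Int) : Int := max st.1 st.2.2.2

-- lexicographic order on (bench, student) pairs
def pvLexLe (q r : Int × Int) : Prop := q.1 < r.1 ∨ (q.1 = r.1 ∧ q.2 ≤ r.2)

-- number of students a block scan adds, given the last-seen student
def pvNew (ls : Option Int) (l : List Int) : Int :=
  ((PySem.Set.ofList (l.filter (fun s => !(some s == ls)))).length : Int)

-- value both programs compute: max over distinct benches of the distinct-student count
def pvMC (M : List (Int × Int)) : Int :=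
  ((PySem.Set.ofList (M.map (·.1))).map (fun b =>
    ((PySem.Set.ofList ((M.filter (fun q => q.1 == b)).map (·.2))).length : Int))).foldl max 0

-- sorted2 with Int keys is sorted with the lexicographic Prod.Lex key
theorem pv_sorted2_eq {α : Type} (xs : List α) (k1 k2 : α → Int) :
    PySem.List.sorted2 xs k1 k2 = PySem.List.sorted xs (fun x => toLex (k1 x, k2 x)) := by
  rw [PySem.List.sorted_eq_foldl_insertBy]
  show List.foldl (fun acc x => PySem.List.insertBy _ x acc) [] xs = _
  congr 1
  funext acc x
  congr 1
  funext a b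
  simp only [Prod.Lex.toLex_lt_toLex]
  by_cases h1 : k1 a < k1 b <;> by_cases h2 : k1 b < k1 a <;> by_cases h3 : k2 a < k2 b <;>
    simp [h1, h2, h3] <;> omega

-- folding Set.add over l starting from any accumulator appends the new distinct elements
theorem pv_foldl_add_eq {α : Type} [BEq α] [LawfulBEq α] :
    ∀ (n : Nat) (l : List α), l.length ≤ n → ∀ (acc : List α),
      l.foldl PySem.Set.add acc = acc ++ PySem.Set.ofList (l.filter (fun x => !acc.contains x)) := by
  intro n
  induction n with
  | zero =>
    intro l hl acc
    have : l = [] := List.eq_nil_of_length_eq_zero (Nat.le_zero.1 hl)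
    subst this; simp [PySem.Set.ofList, PySem.Set.empty]
  | succ m ih =>
    intro l hl acc
    cases l with
    | nil => simp [PySem.Set.ofList, PySem.Set.empty]
    | cons x t =>
      have ht : t.length ≤ m := by simpa using hl
      simp only [List.foldl_cons, List.filter_cons]
      by_cases hx : x ∈ acc
      · rw [show PySem.Set.add acc x = acc by simp [PySem.Set.add, hx]]
        rw [ih t ht acc]
        simp [hx]
      · have hadd : PySem.Set.add acc x = acc ++ [x] := by simp [PySem.Set.add, hx]
        rw [hadd, ih t ht (acc ++ [x])]
        have hxb : (!acc.contains x) = true := by simp [hx]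
        rw [if_pos hxb]
        have hof : PySem.Set.ofList (x :: t.filter (fun y => !acc.contains y))
            = [x] ++ PySem.Set.ofList ((t.filter (fun y => !acc.contains y)).filter
                (fun y => !([x] : List α).contains y)) := by
          show List.foldl PySem.Set.add (PySem.Set.add PySem.Set.empty x) _ = _
          rw [show PySem.Set.add PySem.Set.empty x = [x] from rfl,
            ih _ (le_trans (List.length_filter_le _ _) ht) [x]]
        rw [hof, List.filter_filter, List.append_assoc]
        congr 2
        congr 1
        apply List.filter_congr
        intro y _
        by_cases h1 : y = x <;> by_cases h2 : y ∈ acc <;> simp [h1, h2]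

theorem pv_ofList_cons {α : Type} [BEq α] [LawfulBEq α] (x : α) (m : List α) :
    PySem.Set.ofList (x :: m) = x :: PySem.Set.ofList (m.filter (fun y => !(y == x))) := by
  show List.foldl PySem.Set.add (PySem.Set.add PySem.Set.empty x) m = _
  rw [show PySem.Set.add PySem.Set.empty x = [x] from rfl, pv_foldl_add_eq m.length m le_rfl [x]]
  show _ = [x] ++ _
  congr 2
  apply List.filter_congr
  intro y _
  by_cases h : y = x <;> simp [h]

theorem pv_ofList_const {α : Type} [BEq α] [LawfulBEq α] (l : List α) (b : α)
    (hne : l ≠ []) (hall : ∀ x ∈ l, x = b) : PySem.Set.ofList l = [b] := by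
  cases l with
  | nil => exact absurd rfl hne
  | cons x t =>
    have hx : x = b := hall x (List.mem_cons_self)
    subst hx
    rw [pv_ofList_cons]
    have : t.filter (fun y => !(y == x)) = [] := by
      rw [List.filter_eq_nil_iff]
      intro y hy
      simp [hall y (List.mem_cons_of_mem _ hy)]
    rw [this]
    rfl

theorem pv_perm_ofList_length {α : Type} [BEq α] [LawfulBEq α] {l1 l2 : List α}
    (h : l1.Perm l2) : (PySem.Set.ofList l1).length = (PySem.Set.ofList l2).length := by
  refine List.Perm.length_eq ?_
  rw [List.perm_ext_iff_of_nodup (PySem.Set.nodup_ofList l1) (PySem.Set.nodup_ofList l2)]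
  intro a
  rw [PySem.Set.mem_ofList, PySem.Set.mem_ofList]
  exact h.mem_iff

theorem pv_foldl_max_shift : ∀ (l : List Int) (a c : Int),
    l.foldl max (max a c) = max a (l.foldl max c) := by
  intro l
  induction l with
  | nil => intro a c; rfl
  | cons x t ih =>
    intro a c
    simp only [List.foldl_cons, max_assoc]
    exact ih a (max c x)

-- a scan step on a fresh bench equals a step from the reset state
theorem pv_reset (best cnt : Int) (cur ls : Option Int) (q : Int × Int) (h : some q.1 ≠ cur) :
    pvStep (best, cur, ls, cnt) q = pvStep (max best cnt, some q.1, none, 0) q := by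
  simp [pvStep, h]

-- scanning one bench block adds exactly the number of distinct new students
theorem pv_block : ∀ (xs : List (Int × Int)) (b best cnt : Int) (ls : Option Int),
    (∀ q ∈ xs, q.1 = b) →
    xs.Pairwise (fun q r => q.2 ≤ r.2) →
    (∀ s0, ls = some s0 → ∀ q ∈ xs, s0 ≤ q.2) →
    ∃ ls', xs.foldl pvStep (best, some b, ls, cnt)
      = (best, some b, ls', cnt + pvNew ls (xs.map (·.2))) := by
  intro xs
  induction xs with
  | nil =>
    intro b best cnt ls _ _ _
    exact ⟨ls, by simp [pvNew, PySem.Set.ofList, PySem.Set.empty]⟩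
  | cons q t ih =>
    intro b best cnt ls hb hp hls
    have hqb : q.1 = b := hb q List.mem_cons_self
    have hstep1 : pvStep (best, some b, ls, cnt) q
        = if some q.2 ≠ ls then (best, some b, some q.2, cnt + 1) else (best, some b, ls, cnt) := by
      simp [pvStep, hqb]
    rw [List.foldl_cons, hstep1]
    by_cases hq : some q.2 = ls
    · rw [if_neg (by simpa using hq)]
      obtain ⟨ls', h⟩ := ih b best cnt ls (fun r hr => hb r (List.mem_cons_of_mem _ hr))
        (List.Pairwise.sublist (List.sublist_cons_self _ _) hp)
        (fun s0 hs0 r hr => hls s0 hs0 r (List.mem_cons_of_mem _ hr))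
      refine ⟨ls', h.trans ?_⟩
      have : pvNew ls ((q :: t).map (·.2)) = pvNew ls (t.map (·.2)) := by
        simp [pvNew, hq]
      rw [this]
    · rw [if_pos (by simpa using hq)]
      have hple : ∀ r ∈ t, q.2 ≤ r.2 := by
        have := List.pairwise_cons.1 hp
        exact this.1
      obtain ⟨ls', h⟩ := ih b best (cnt + 1) (some q.2)
        (fun r hr => hb r (List.mem_cons_of_mem _ hr))
        (List.Pairwise.sublist (List.sublist_cons_self _ _) hp)
        (by rintro s0 hs0 r hr; cases Option.some.inj hs0; exact hple r hr)
      refine ⟨ls', h.trans ?_⟩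
      -- cnt + 1 + pvNew (some q.2) = cnt + pvNew ls (q.2 :: …)
      have hkeepq : (!(some q.2 == ls)) = true := by simpa using hq
      have hkeept : (t.map (·.2)).filter (fun s => !(some s == ls)) = t.map (·.2) := by
        apply List.filter_eq_self.2
        intro s hs
        obtain ⟨r, hr, hrs⟩ := List.mem_map.1 hs
        cases ls with
        | none => simp
        | some s0 =>
          have h1 : s0 ≤ q.2 := hls s0 rfl q List.mem_cons_self
          have h2 : s0 ≠ q.2 := fun h => hq (by rw [h])
          have h3 : q.2 ≤ r.2 := hple r hr
          subst hrs
          have : r.2 ≠ s0 := by omega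
          simp [this]
      have : pvNew ls ((q :: t).map (·.2)) = 1 + pvNew (some q.2) (t.map (·.2)) := by
        simp only [pvNew, List.map_cons]
        rw [List.filter_cons, if_pos hkeepq, hkeept, pv_ofList_cons]
        simp only [List.length_cons]
        push_cast
        have : (t.map (·.2)).filter (fun y => !(y == q.2))
            = (t.map (·.2)).filter (fun s => !(some s == some q.2)) := by
          apply List.filter_congr; intro y _; simp
        rw [this]
        ring
      rw [this]
      ring_nf

-- splitting off the first bench block splits the spec value
theorem pv_mc_split (blk rest : List (Int × Int)) (b : Int) (hne : blk ≠ [])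
    (hb : ∀ q ∈ blk, q.1 = b) (hr : ∀ q ∈ rest, q.1 ≠ b) :
    pvMC (blk ++ rest)
      = max ((PySem.Set.ofList (blk.map (·.2))).length : Int) (pvMC rest) := by
  have hbne : blk.map (·.1) ≠ [] := by
    cases blk with | nil => exact absurd rfl hne | cons _ _ => simp
  have hconst : PySem.Set.ofList (blk.map (·.1)) = [b] :=
    pv_ofList_const _ b hbne (by
      intro x hx; obtain ⟨r, hrm, hrx⟩ := List.mem_map.1 hx; rw [← hrx]; exact hb r hrm)
  have hbids : PySem.Set.ofList ((blk ++ rest).map (·.1))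
      = b :: PySem.Set.ofList (rest.map (·.1)) := by
    rw [List.map_append]
    show List.foldl PySem.Set.add PySem.Set.empty _ = _
    rw [List.foldl_append]
    show List.foldl PySem.Set.add (PySem.Set.ofList (blk.map (·.1))) _ = _
    rw [hconst, pv_foldl_add_eq (rest.map (·.1)).length _ le_rfl]
    have : (rest.map (·.1)).filter (fun x => !([b] : List Int).contains x) = rest.map (·.1) := by
      apply List.filter_eq_self.2
      intro x hx
      obtain ⟨r, hrm, hrx⟩ := List.mem_map.1 hx
      simp [← hrx, hr r hrm]
    rw [this]
    rfl
  -- the per-bench count function, relative to the full list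
  have hfilter_b : (blk ++ rest).filter (fun q => q.1 == b) = blk := by
    rw [List.filter_append, List.filter_eq_self.2 (fun q hq => by simp [hb q hq]),
      List.filter_eq_nil_iff.2 (fun q hq => by simp [hr q hq]), List.append_nil]
  have hfilter_ne : ∀ b' : Int, b' ≠ b →
      (blk ++ rest).filter (fun q => q.1 == b') = rest.filter (fun q => q.1 == b') := by
    intro b' hb'
    rw [List.filter_append, List.filter_eq_nil_iff.2 (fun q hq => by
      have := hb q hq; simp [this]; omega), List.nil_append]
  unfold pvMC
  rw [hbids, List.map_cons, List.foldl_cons, hfilter_b]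
  have hmapeq : (PySem.Set.ofList (rest.map (·.1))).map (fun b' =>
        ((PySem.Set.ofList (((blk ++ rest).filter (fun q => q.1 == b')).map (·.2))).length : Int))
      = (PySem.Set.ofList (rest.map (·.1))).map (fun b' =>
        ((PySem.Set.ofList ((rest.filter (fun q => q.1 == b')).map (·.2))).length : Int)) := by
    apply List.map_congr_left
    intro b' hb'
    have : b' ≠ b := by
      have hmem := (PySem.Set.mem_ofList _ _).1 hb'
      obtain ⟨r, hrm, hrx⟩ := List.mem_map.1 hmem
      rw [← hrx]; exact hr r hrm
    rw [hfilter_ne b' this]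
  rw [hmapeq]
  have h0 : max (0 : Int) ((PySem.Set.ofList (blk.map (·.2))).length : Int)
      = max ((PySem.Set.ofList (blk.map (·.2))).length : Int) 0 := max_comm _ _
  rw [h0, pv_foldl_max_shift]

-- the scan on a lex-sorted list computes the max distinct-student bench count
theorem pv_outer : ∀ (n : Nat) (M : List (Int × Int)), M.length ≤ n →
    ∀ (best cnt : Int) (cur ls : Option Int),
    M.Pairwise pvLexLe → (∀ q ∈ M, some q.1 ≠ cur) → 0 ≤ best → 0 ≤ cnt →
    pvFinal (M.foldl pvStep (best, cur, ls, cnt)) = max (max best cnt) (pvMC M) := by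
  intro n
  induction n with
  | zero =>
    intro M hM best cnt cur ls _ _ hb hc
    have : M = [] := List.eq_nil_of_length_eq_zero (Nat.le_zero.1 hM)
    subst this
    simp [pvFinal, pvMC, PySem.Set.ofList, PySem.Set.empty]
    omega
  | succ m ih =>
    intro M hM best cnt cur ls hpair hcur hbest hcnt
    cases hM0 : M with
    | nil =>
      subst hM0
      simp [pvFinal, pvMC, PySem.Set.ofList, PySem.Set.empty]
      omega
    | cons q t =>
      subst hM0
      set b := q.1 with hbdef
      set blk := (q :: t).takeWhile (fun r => r.1 == b) with hblk
      set rest := (q :: t).dropWhile (fun r => r.1 == b) with hrest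
      have hsplit : blk ++ rest = q :: t := List.takeWhile_append_dropWhile
      have hblk_cons : ∃ blk', blk = q :: blk' := by
        refine ⟨t.takeWhile (fun r => r.1 == b), ?_⟩
        rw [hblk, List.takeWhile_cons, if_pos (by simp [hbdef])]
      obtain ⟨blk', hblk'⟩ := hblk_cons
      -- properties of blk
      have hb_blk : ∀ r ∈ blk, r.1 = b := by
        intro r hrm
        have := List.mem_takeWhile_imp (hblk ▸ hrm)
        simpa using this
      -- rest: every bench is ≠ b (in fact > b)
      have hq_le : ∀ r ∈ t, b ≤ r.1 := by
        intro r hrm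
        have := (List.pairwise_cons.1 hpair).1 r hrm
        rcases this with h | ⟨h, _⟩ <;> omega
      have hrest_sub : ∀ r ∈ rest, r ∈ q :: t := fun r hrm =>
        (List.dropWhile_sublist _).subset (hrest ▸ hrm)
      have hrest_pair : rest.Pairwise pvLexLe :=
        List.Pairwise.sublist (hrest ▸ List.dropWhile_sublist _) hpair
      have hr_ne : ∀ r ∈ rest, r.1 ≠ b := by
        intro r hrm
        cases hdw : List.dropWhile (fun r : Int × Int => r.1 == b) (q :: t) with
        | nil =>
          exact absurd hrm (by rw [hrest, hdw]; exact List.not_mem_nil)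
        | cons r0 r' =>
          have hrm' : r ∈ r0 :: r' := by rw [hrest, hdw] at hrm; exact hrm
          have hr0p : ¬ (r0.1 == b) = true := by
            have := List.head?_dropWhile_not (fun r : Int × Int => r.1 == b) (q :: t)
            rw [hdw] at this
            simpa using this
          have hr0b : r0.1 ≠ b := by simpa using hr0p
          have hr0gt : b < r0.1 := by
            have hr0m : r0 ∈ q :: t := hrest_sub r0 (by
              rw [hrest, hdw]; exact List.mem_cons_self)
            rcases List.mem_cons.1 hr0m with h | h
            · exact absurd (by rw [h]) hr0b
            · have := hq_le r0 h; omega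
          rcases List.mem_cons.1 hrm' with h | h
          · rw [h]; exact hr0b
          · have hp' : (r0 :: r').Pairwise pvLexLe := by
              rw [hrest, hdw] at hrest_pair; exact hrest_pair
            have : pvLexLe r0 r := (List.pairwise_cons.1 hp').1 r h
            rcases this with hlt | ⟨heq, _⟩ <;> omega
      -- run the scan over blk from the reset state
      have hfold : (q :: t).foldl pvStep (best, cur, ls, cnt)
          = rest.foldl pvStep (blk.foldl pvStep (max best cnt, some b, none, 0)) := by
        rw [← hsplit, List.foldl_append, hblk']
        simp only [List.foldl_cons]
        rw [pv_reset best cnt cur ls q (hcur q List.mem_cons_self)]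
      have hblk_pair : blk.Pairwise (fun q r : Int × Int => q.2 ≤ r.2) := by
        have hsub : blk.Pairwise pvLexLe :=
          List.Pairwise.sublist (hblk ▸ List.takeWhile_sublist _) hpair
        refine List.Pairwise.imp_of_mem ?_ hsub
        intro x y hx hy hxy
        rcases hxy with h | ⟨_, h⟩
        · have := hb_blk x hx; have := hb_blk y hy; omega
        · exact h
      obtain ⟨ls', hblkrun⟩ := pv_block blk b (max best cnt) 0 none hb_blk hblk_pair
        (by rintro s0 ⟨⟩)
      rw [hfold, hblkrun]
      have hD0 : (0 : Int) + pvNew none (blk.map (·.2))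
          = ((PySem.Set.ofList (blk.map (·.2))).length : Int) := by
        simp [pvNew]
      rw [hD0]
      -- recurse on rest
      have hrest_len : rest.length ≤ m := by
        have h1 : blk.length + rest.length = (q :: t).length := by
          rw [← List.length_append, hsplit]
        have h2 : 1 ≤ blk.length := by rw [hblk']; simp
        simp only [List.length_cons] at h1 hM
        omega
      rw [ih rest hrest_len (max best cnt) _ (some b) ls' hrest_pair
        (fun r hrm => by simpa using fun hh => hr_ne r hrm hh)
        (by omega) (Int.natCast_nonneg _)]
      -- combine with the spec split
      rw [← hsplit, pv_mc_split blk rest b (by rw [hblk']; simp) hb_blk hr_ne, max_assoc]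

-- ===== A-side lemmas (characterise A's dict of sets) =====

-- A's per-bench set after the fold, characterised by getD
theorem pv_getD_foldl_addSet (qs : List (Int × Int)) (d : PySem.Dict Int (PySem.Set Int)) (b : Int) :
    (qs.foldl (fun d q => d.modify q.2 PySem.Set.empty (fun s => s.add q.1)) d).getD b PySem.Set.empty
      = PySem.Set.update (d.getD b PySem.Set.empty) ((qs.filter (fun q => q.2 == b)).map (fun q => q.1)) := by
  induction qs generalizing d with
  | nil => rfl
  | cons q qs ih =>
    rw [List.foldl_cons, ih, PySem.Dict.getD_modify, List.filter_cons]
    by_cases h : q.2 = b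
    · simp [h, PySem.Set.update]
    · have hb : (q.2 == b) = false := by simp [h]
      have hb' : ¬ (b = q.2) := fun hh => h hh.symm
      simp [hb, hb', PySem.Set.update]

-- A's setdefault-then-modify step is a plain modify with default empty
theorem pv_step_eq_modify (d : PySem.Dict Int (PySem.Set Int)) (sid bid : Int) :
    (if d.contains bid then d else d.insert bid PySem.Set.empty).modify bid PySem.Set.empty
        (fun s => PySem.Set.add s sid)
      = d.modify bid PySem.Set.empty (fun s => PySem.Set.add s sid) := by
  by_cases h : d.contains bid
  · rw [if_pos h]
  · rw [if_neg h]
    have hnone : ∀ p ∈ d.items, (p.1 == bid) = false := by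
      intro p hp
      by_contra hc
      exact h (List.any_eq_true.2 ⟨p, hp, by simpa using hc⟩)
    have hgd : (d.insert bid PySem.Set.empty).getD bid PySem.Set.empty = PySem.Set.empty := by
      rw [PySem.Dict.getD, PySem.Dict.get?_insert_self]; rfl
    have hgd' : d.getD bid PySem.Set.empty = PySem.Set.empty := by
      rw [PySem.Dict.getD, (PySem.Dict.get?_eq_none_iff_contains d bid).2 (by simpa using h)]; rfl
    have hins : d.insert bid PySem.Set.empty
        = PySem.Dict.mk (d.items ++ [(bid, PySem.Set.empty)]) := by
      rw [PySem.Dict.insert, if_neg (by simpa [PySem.Dict.contains] using h)]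
    have hc1 : (PySem.Dict.mk (d.items ++ [(bid, PySem.Set.empty)])).contains bid = true := by
      simp [PySem.Dict.contains]
    rw [PySem.Dict.modify, PySem.Dict.modify, hgd, hgd', hins,
      PySem.Dict.insert, if_pos hc1, PySem.Dict.insert,
      if_neg (by simpa [PySem.Dict.contains] using h)]
    apply PySem.Dict.ext
    simp only [List.map_append]
    congr 1
    · exact (List.map_congr_left (g := id) (fun p hp => by simp [hnone p hp])).trans
        (List.map_id d.items)
    · simp

-- values of a Nodup-keyed dict are the getD images of its keys
theorem pv_values_eq_map_keys {κ ν : Type} [BEq κ] [LawfulBEq κ]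
    (d : PySem.Dict κ ν) (hnd : d.keys.Nodup) (d0 : ν) :
    d.values = d.keys.map (fun k => d.getD k d0) := by
  show d.items.map (fun p => p.2) = (d.items.map (fun p => p.1)).map (fun k => d.getD k d0)
  rw [List.map_map]
  apply List.map_congr_left
  intro p hp
  exact (PySem.Dict.getD_of_mem_items d (by exact hp) hnd d0).symm

-- ===== main equivalence =====
theorem pv_main (students : List (List Int)) :
    maxStudentsOnBench students = maxStudentsOnBench_alt students := by
  unfold maxStudentsOnBench maxStudentsOnBench_alt
  dsimp only
  -- ===== A's side: reduce to max over distinct benches of distinct-student counts =====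
  have hA1 : students.foldl
      (fun benches pair =>
        (if benches.contains ((PySem.List.pyGet? pair 1).getD 0) then benches
         else benches.insert ((PySem.List.pyGet? pair 1).getD 0) PySem.Set.empty).modify
          ((PySem.List.pyGet? pair 1).getD 0) PySem.Set.empty
          (fun s => PySem.Set.add s ((PySem.List.pyGet? pair 0).getD 0))) PySem.Dict.empty
    = (students.map (fun p =>
          ((PySem.List.pyGet? p 0).getD 0, (PySem.List.pyGet? p 1).getD 0))).foldl
        (fun d q => d.modify q.2 PySem.Set.empty (fun s => PySem.Set.add s q.1))
        PySem.Dict.empty := by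
    rw [List.foldl_map]
    apply PySem.List.foldl_congr_mem
    intro acc x _
    exact pv_step_eq_modify acc _ _
  rw [hA1]
  set qs := students.map (fun p =>
    ((PySem.List.pyGet? p 0).getD 0, (PySem.List.pyGet? p 1).getD 0)) with hqs
  set D := qs.foldl
    (fun d q => d.modify q.2 PySem.Set.empty (fun s => PySem.Set.add s q.1))
    PySem.Dict.empty with hD
  have hkeys : D.keys = PySem.Set.ofList (qs.map (fun q => q.2)) := by
    rw [hD, PySem.Dict.keys_foldl_modify_key qs (fun q => q.2) PySem.Set.empty
      (fun _ q s => PySem.Set.add s q.1), PySem.Dict.keys_empty, PySem.Set.update_nil_left]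
  have hnd : D.keys.Nodup := hkeys ▸ PySem.Set.nodup_ofList _
  have hval : ∀ b : Int, D.getD b PySem.Set.empty
      = PySem.Set.ofList ((qs.filter (fun q => q.2 == b)).map (fun q => q.1)) := by
    intro b
    rw [hD, pv_getD_foldl_addSet, PySem.Dict.getD_empty,
      show (PySem.Set.empty : PySem.Set Int) = ([] : PySem.Set Int) from rfl,
      PySem.Set.update_nil_left]
  rw [pv_values_eq_map_keys D hnd PySem.Set.empty, hkeys, List.foldl_map]
  have hAfn : ∀ b : Int, PySem.Set.len (D.getD b PySem.Set.empty)
      = ((PySem.Set.ofList ((qs.filter (fun q => q.2 == b)).map (fun q => q.1))).length : Int) := by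
    intro b; rw [hval b]; rfl
  have hAside : (PySem.Set.ofList (qs.map (fun q => q.2))).foldl
        (fun result b => max result (PySem.Set.len (D.getD b PySem.Set.empty))) 0
      = ((PySem.Set.ofList (qs.map (fun q => q.2))).map (fun b =>
          ((PySem.Set.ofList ((qs.filter (fun q => q.2 == b)).map (fun q => q.1))).length : Int))).foldl
          max 0 := by
    rw [List.foldl_map]
    apply PySem.List.foldl_congr_mem
    intro acc b _
    rw [hAfn b]
  rw [hAside]
  -- ===== B's side: the scan over the lex-sorted copy =====
  rw [pv_sorted2_eq]
  have hBfold : (PySem.List.sorted students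
        (fun p => toLex (((PySem.List.pyGet? p 1).getD 0), ((PySem.List.pyGet? p 0).getD 0)))).foldl
      (fun st p =>
        let s := (PySem.List.pyGet? p 0).getD 0
        let b := (PySem.List.pyGet? p 1).getD 0
        let st1 := if some b ≠ st.2.1 then (max st.1 st.2.2.2, some b, (none : Option Int), (0 : Int)) else st
        if some s ≠ st1.2.2.1 then (st1.1, st1.2.1, some s, st1.2.2.2 + 1) else st1)
      ((0 : Int), (none : Option Int), (none : Option Int), (0 : Int))
    = ((PySem.List.sorted students
        (fun p => toLex (((PySem.List.pyGet? p 1).getD 0), ((PySem.List.pyGet? p 0).getD 0)))).map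
        (fun p => (((PySem.List.pyGet? p 1).getD 0 : Int), ((PySem.List.pyGet? p 0).getD 0 : Int)))).foldl
        pvStep ((0 : Int), (none : Option Int), (none : Option Int), (0 : Int)) := by
    rw [List.foldl_map]
    rfl
  rw [hBfold]
  set M := ((PySem.List.sorted students
      (fun p => toLex (((PySem.List.pyGet? p 1).getD 0), ((PySem.List.pyGet? p 0).getD 0)))).map
      (fun p => (((PySem.List.pyGet? p 1).getD 0 : Int), ((PySem.List.pyGet? p 0).getD 0 : Int)))) with hM
  have hMpair : M.Pairwise pvLexLe := by
    rw [hM, List.pairwise_map]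
    refine (PySem.List.sorted_pairwise students _).imp ?_
    intro a c h
    have := Prod.Lex.toLex_le_toLex.1 h
    exact this
  have hfin : pvFinal (M.foldl pvStep ((0 : Int), (none : Option Int), (none : Option Int), (0 : Int)))
      = max (max 0 0) (pvMC M) :=
    pv_outer M.length M le_rfl 0 0 none none hMpair (fun q _ => by simp) le_rfl le_rfl
  have hfin' : pvFinal (M.foldl pvStep ((0 : Int), (none : Option Int), (none : Option Int), (0 : Int)))
      = pvMC M := by
    rw [hfin]
    have h0 : (0 : Int) ≤ pvMC M := (PySem.List.le_foldl_max _ 0).1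
    omega
  show _ = pvFinal (M.foldl pvStep ((0 : Int), (none : Option Int), (none : Option Int), (0 : Int)))
  rw [hfin']
  -- ===== bridge: pvMC M equals A's value =====
  have hperm0 : M.Perm (qs.map (fun q => (q.2, q.1))) := by
    rw [hM, hqs, List.map_map]
    exact (PySem.List.sorted_perm students _ false).map _
  have hSperm : (PySem.Set.ofList (qs.map (fun q => q.2))).Perm
      (PySem.Set.ofList (M.map (fun q => q.1))) := by
    rw [List.perm_ext_iff_of_nodup (PySem.Set.nodup_ofList _) (PySem.Set.nodup_ofList _)]
    intro a
    rw [PySem.Set.mem_ofList, PySem.Set.mem_ofList]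
    have hmm : (M.map (fun q => q.1)).Perm (qs.map (fun q => q.2)) := by
      have h := hperm0.map (fun q : Int × Int => q.1)
      have h2 : ((qs.map (fun q => (q.2, q.1))).map (fun q : Int × Int => q.1))
          = qs.map (fun q => q.2) := by
        rw [List.map_map]
        rfl
      rwa [h2] at h
    exact hmm.symm.mem_iff
  have hfun : (fun b => ((PySem.Set.ofList ((M.filter (fun q => q.1 == b)).map (·.2))).length : Int))
      = (fun b => ((PySem.Set.ofList ((qs.filter (fun q => q.2 == b)).map (fun q => q.1))).length : Int)) := by
    funext b
    have hp1 : (M.filter (fun q => q.1 == b)).Perm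
        ((qs.map (fun q => (q.2, q.1))).filter (fun q => q.1 == b)) := hperm0.filter _
    have hp2 : ((qs.map (fun q => (q.2, q.1))).filter (fun q => q.1 == b))
        = (qs.filter (fun q => q.2 == b)).map (fun q => (q.2, q.1)) := by
      rw [List.filter_map]
      rfl
    have hp3 : ((M.filter (fun q => q.1 == b)).map (·.2)).Perm
        ((qs.filter (fun q => q.2 == b)).map (fun q => q.1)) := by
      have := (hp1.map (·.2))
      rw [hp2, List.map_map] at this
      exact this
    exact_mod_cast congrArg Nat.cast (pv_perm_ofList_length hp3)
  unfold pvMC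
  rw [hfun]
  exact (hSperm.map _).foldl_eq 0

-- ===== VERDICT (by name: the statement is the Claim_ definition above) =====
theorem maxStudentsOnBench_spec : Claim_equal_maxStudentsOnBench := by
  intro students _ _
  exact pv_main students
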